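-- pv_equiv track=rewrite | github.com/purrranium/KeyWordFinder | main.py | GetRequiredKeywordsMatch
-- ===== SOURCE A (Python) =====
-- def GetRequiredKeywordsMatch(splitedJs, keywords):
--     m = {}
--
--     for word in splitedJs:
--         if word in keywords:
--             if word in m:
--                 m[word] = m[word] + 1
--             else:
--                 m[word] = 1
--     return dict(sorted(m.items(), key=lambda x: x[1], reverse=True))
-- ===== SOURCE B (Python) =====
-- def GetRequiredKeywordsMatch(splitedJs, keywords):
--     entries = []
--     for w in dict.fromkeys(splitedJs):
--         if w in keywords:
--             entries.append((w, splitedJs.count(w)))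
--     result = {}
--     for c in range(len(splitedJs), 0, -1):
--         for w, k in entries:
--             if k == c:
--                 result[w] = k
--     return result
-- ===== Notes on version B (the rewrite author's own statement) =====
-- stated objective: alternative
-- what changed: A makes one incremental pass building a counter dict and then calls the library sort; B stages the work differently: it deduplicates splitedJs first, computes each distinct keyword's frequency directly with splitedJs.count, and replaces the sort by a descending bucket sweep (a counting-sort pass over counts len(splitedJs)..1) that emits entries bucket by bucket, reproducing the stable count-descending order.
import Mathlib
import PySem

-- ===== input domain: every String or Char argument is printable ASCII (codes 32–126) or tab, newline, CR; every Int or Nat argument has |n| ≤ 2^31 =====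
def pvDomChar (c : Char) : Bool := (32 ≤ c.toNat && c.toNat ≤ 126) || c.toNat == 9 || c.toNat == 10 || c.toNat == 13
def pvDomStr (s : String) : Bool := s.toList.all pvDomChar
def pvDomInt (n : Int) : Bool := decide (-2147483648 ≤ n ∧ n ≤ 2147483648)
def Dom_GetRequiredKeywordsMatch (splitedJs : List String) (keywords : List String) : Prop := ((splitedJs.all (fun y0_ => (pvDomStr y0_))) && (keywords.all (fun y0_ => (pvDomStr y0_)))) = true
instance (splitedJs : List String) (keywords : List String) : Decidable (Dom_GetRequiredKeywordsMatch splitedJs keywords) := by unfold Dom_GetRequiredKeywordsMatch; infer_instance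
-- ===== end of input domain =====

-- B replaces A's incremental counter dict + library sort by a staged computation: dedup,
-- direct counting, and a descending bucket sweep (counting sort) instead of sorted();
-- objective: alternative decomposition, same result.

-- ===== PORT A =====
-- m = {}; for word in splitedJs: if word in keywords: m[word] = m[word]+1 / m[word] = 1;
-- return dict(sorted(m.items(), key=lambda x: x[1], reverse=True))
def GetRequiredKeywordsMatch (splitedJs : List String) (keywords : List String) : List (String × Int) :=
  (PySem.Dict.ofList (PySem.List.sorted
    (splitedJs.foldl (fun m word =>
      if word ∈ keywords then
        (if m.contains word then m.insert word (m.getD word 0 + 1) else m.insert word 1)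
      else m) PySem.Dict.empty).items
    (fun x => x.2) true)).items

-- ===== PORT B =====
-- entries = []; for w in dict.fromkeys(splitedJs): if w in keywords: entries.append((w, splitedJs.count(w)))
-- result = {}; for c in range(len(splitedJs), 0, -1): for (w, k) in entries: if k == c: result[w] = k
-- return result
def GetRequiredKeywordsMatch_alt (splitedJs : List String) (keywords : List String) : List (String × Int) :=
  let entries : List (String × Int) := (PySem.List.dedup splitedJs).foldl
    (fun acc w => if w ∈ keywords then acc ++ [(w, ((PySem.List.count splitedJs w : Nat) : Int))] else acc) []
  ((PySem.List.pyRange (splitedJs.length : Int) 0 (-1)).foldl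
    (fun r c => entries.foldl (fun r p => if p.2 = c then r.insert p.1 p.2 else r) r)
    PySem.Dict.empty).items

-- ===== PRECONDITION & SPEC =====
def Spec_GetRequiredKeywordsMatch (splitedJs : List String) (keywords : List String) (out : List (String × Int)) : Prop := out = GetRequiredKeywordsMatch_alt splitedJs keywords
instance (splitedJs : List String) (keywords : List String) (out : List (String × Int)) : Decidable (Spec_GetRequiredKeywordsMatch splitedJs keywords out) := by unfold Spec_GetRequiredKeywordsMatch; infer_instance

-- ===== CLAIM (what is proved, stated in full; the proofs are below) =====
def Claim_equal_GetRequiredKeywordsMatch : Prop := ∀ (splitedJs : List String) (keywords : List String), Dom_GetRequiredKeywordsMatch splitedJs keywords → Spec_GetRequiredKeywordsMatch splitedJs keywords (GetRequiredKeywordsMatch splitedJs keywords)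

-- ===== LEMMAS AND PROOFS =====

-- Set.add commutes with filter (element kept by the filter)
theorem pv_add_filter {α : Type} [BEq α] [LawfulBEq α] (q : α → Bool) (s : List α) (x : α)
    (hq : q x = true) :
    (PySem.Set.add s x).filter q = PySem.Set.add (s.filter q) x := by
  rw [PySem.Set.add_eq_ite, PySem.Set.add_eq_ite]
  by_cases hx : x ∈ s
  · rw [if_pos hx, if_pos (List.mem_filter.mpr ⟨hx, hq⟩)]
  · rw [if_neg hx, if_neg (fun hc => hx (List.mem_filter.mp hc).1)]
    simp [List.filter_append, hq]

-- Set.add leaves the filter unchanged (element dropped by the filter)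
theorem pv_add_filter_neg {α : Type} [BEq α] [LawfulBEq α] (q : α → Bool) (s : List α) (x : α)
    (hq : q x = false) :
    (PySem.Set.add s x).filter q = s.filter q := by
  rw [PySem.Set.add_eq_ite]
  by_cases hx : x ∈ s
  · rw [if_pos hx]
  · rw [if_neg hx]
    simp [List.filter_append, hq]

-- folding Set.add over a filtered list computes the filter of the fold
theorem pv_foldl_add_filter {α : Type} [BEq α] [LawfulBEq α] (q : α → Bool) (l : List α) :
    ∀ s : List α, (l.filter q).foldl PySem.Set.add (s.filter q)
      = (l.foldl PySem.Set.add s).filter q := by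
  induction l with
  | nil => intro s; rfl
  | cons x l ih =>
    intro s
    cases hq : q x with
    | true =>
      have := ih (PySem.Set.add s x)
      rw [pv_add_filter q s x hq] at this
      simpa [List.filter_cons, hq] using this
    | false =>
      have := ih (PySem.Set.add s x)
      rw [pv_add_filter_neg q s x hq] at this
      simpa [List.filter_cons, hq] using this

theorem pv_ofList_filter {α : Type} [BEq α] [LawfulBEq α] (q : α → Bool) (l : List α) :
    PySem.Set.ofList (l.filter q) = (PySem.Set.ofList l).filter q := by
  have := pv_foldl_add_filter q l []
  simpa [PySem.Set.ofList, PySem.Set.empty] using this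

-- A's loop body is the counter step, guarded
theorem pv_stepA_eq (keywords : List String) :
    (fun (m : PySem.Dict String Int) (word : String) =>
      if word ∈ keywords then
        (if m.contains word then m.insert word (m.getD word 0 + 1) else m.insert word 1)
      else m)
    = (fun (m : PySem.Dict String Int) (word : String) =>
      if word ∈ keywords then m.insert word (m.getD word 0 + 1) else m) := by
  funext m word
  by_cases hk : word ∈ keywords
  · simp only [hk, if_true]
    cases hc : m.contains word with
    | true => simp
    | false => rw [PySem.Dict.getD_of_not_contains m 0 hc]; norm_num
  · simp [hk]

-- the filtered-keyword entry list, shared intermediate of both reductions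
def pvEntries (splitedJs keywords : List String) : List (String × Int) :=
  ((PySem.List.dedup splitedJs).filter (fun w => decide (w ∈ keywords))).map
    (fun w => (w, ((PySem.List.count splitedJs w : Nat) : Int)))

-- A's dict m has exactly pvEntries as its items
theorem pv_itemsA (splitedJs keywords : List String) :
    (splitedJs.foldl (fun m word =>
      if word ∈ keywords then
        (if m.contains word then m.insert word (m.getD word 0 + 1) else m.insert word 1)
      else m) PySem.Dict.empty).items = pvEntries splitedJs keywords := by
  rw [pv_stepA_eq keywords]
  rw [PySem.List.foldl_ite_eq_foldl_filter (fun w => w ∈ keywords)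
        (fun (m : PySem.Dict String Int) word => m.insert word (m.getD word 0 + 1))]
  rw [PySem.Dict.foldl_insert_getD_add_one_eq_counter, PySem.Dict.items_counter]
  unfold pvEntries
  have hset : PySem.Set.ofList (splitedJs.filter (fun w => decide (w ∈ keywords)))
      = (PySem.List.dedup splitedJs).filter (fun w => decide (w ∈ keywords)) := by
    rw [pv_ofList_filter]
    simp [PySem.List.dedup_eq_ofList]
  rw [hset]
  apply List.map_congr_left
  intro w hw
  rw [List.mem_filter] at hw
  have hcnt : List.count w (List.filter (fun x => decide (x ∈ keywords)) splitedJs)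
      = List.count w splitedJs := List.count_filter hw.2
  rw [hcnt, PySem.List.count_eq]

-- B's entry loop builds pvEntries
theorem pv_entriesB (splitedJs keywords : List String) :
    (PySem.List.dedup splitedJs).foldl
      (fun acc w => if w ∈ keywords then acc ++ [(w, ((PySem.List.count splitedJs w : Nat) : Int))] else acc) []
    = pvEntries splitedJs keywords := by
  have := PySem.List.foldl_append_if (fun w => decide (w ∈ keywords))
    (fun w => (w, ((PySem.List.count splitedJs w : Nat) : Int))) (PySem.List.dedup splitedJs) []
  simpa [pvEntries] using this

-- the bucket list: for each count c from n down to 1, the entries with that count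
def pvBuckets (n : Int) (es : List (String × Int)) : List (String × Int) :=
  ((PySem.List.pyRange n 0 (-1)).map (fun c => es.filter (fun p => decide (p.2 = c)))).flatten

-- insertBy skips a prefix it does not go before
theorem pv_insertBy_append {α : Type} (bef : α → α → Bool) (x : α) (ys zs : List α)
    (h : ∀ y ∈ ys, bef x y = false) :
    PySem.List.insertBy bef x (ys ++ zs) = ys ++ PySem.List.insertBy bef x zs := by
  induction ys with
  | nil => rfl
  | cons y ys ih =>
    have hy : bef x y = false := h y (List.mem_cons_self)
    simp only [List.cons_append, PySem.List.insertBy, hy]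
    simp [ih (fun y hy => h y (List.mem_cons_of_mem _ hy))]

-- insertBy goes in front of a list it goes before everywhere
theorem pv_insertBy_front {α : Type} (bef : α → α → Bool) (x : α) (zs : List α)
    (h : ∀ z ∈ zs, bef x z = true) :
    PySem.List.insertBy bef x zs = x :: zs := by
  cases zs with
  | nil => rfl
  | cons z zs => simp [PySem.List.insertBy, h z List.mem_cons_self]

-- a descending range splits at any interior point
theorem pv_pyRange_neg_append (a m b : Int) (h1 : b ≤ m) (h2 : m ≤ a) :
    PySem.List.pyRange a b (-1) = PySem.List.pyRange a m (-1) ++ PySem.List.pyRange m b (-1) := by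
  rw [PySem.List.pyRange_neg_one_eq_reverse, PySem.List.pyRange_neg_one_eq_reverse,
      PySem.List.pyRange_neg_one_eq_reverse,
      PySem.List.pyRange_one_append (b + 1) (m + 1) (a + 1) (by omega) (by omega)]
  simp

-- inserting one element into the bucket flattening appends it to its own bucket
theorem pv_insertBy_buckets (n : Int) (es : List (String × Int)) (x : String × Int)
    (hx1 : 1 ≤ x.2) (hx2 : x.2 ≤ n) :
    PySem.List.insertBy (fun a b => decide (b.2 < a.2)) x (pvBuckets n es)
      = pvBuckets n (es ++ [x]) := by
  unfold pvBuckets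
  rw [pv_pyRange_neg_append n x.2 0 (by omega) hx2,
      PySem.List.pyRange_neg_one_cons (show (0:Int) < x.2 by omega)]
  simp only [List.map_append, List.map_cons, List.flatten_append, List.flatten_cons]
  rw [← List.append_assoc]
  rw [pv_insertBy_append _ x _ _ (by
    intro y hy
    rcases List.mem_append.mp hy with hy | hy
    · rcases List.mem_flatten.mp hy with ⟨l, hl, hyl⟩
      rcases List.mem_map.mp hl with ⟨c, hc, rfl⟩
      have hcgt : x.2 < c := (PySem.List.mem_pyRange_neg_one.mp hc).1
      have : y.2 = c := by simpa using (List.mem_filter.mp hyl).2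
      simp [this]; omega
    · have : y.2 = x.2 := by simpa using (List.mem_filter.mp hy).2
      simp [this])]
  rw [pv_insertBy_front _ x _ (by
    intro z hz
    rcases List.mem_flatten.mp hz with ⟨l, hl, hzl⟩
    rcases List.mem_map.mp hl with ⟨c, hc, rfl⟩
    have hclt : c ≤ x.2 - 1 := (PySem.List.mem_pyRange_neg_one.mp hc).2
    have : z.2 = c := by simpa using (List.mem_filter.mp hzl).2
    simp [this]; omega)]
  -- rewrite the right-hand side bucket by bucket
  have hHi : (PySem.List.pyRange n x.2 (-1)).map (fun c => (es ++ [x]).filter (fun p => decide (p.2 = c)))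
      = (PySem.List.pyRange n x.2 (-1)).map (fun c => es.filter (fun p => decide (p.2 = c))) := by
    apply List.map_congr_left
    intro c hc
    have hcgt : x.2 < c := (PySem.List.mem_pyRange_neg_one.mp hc).1
    simp [List.filter_append]
    omega
  have hLo : (PySem.List.pyRange (x.2 - 1) 0 (-1)).map (fun c => (es ++ [x]).filter (fun p => decide (p.2 = c)))
      = (PySem.List.pyRange (x.2 - 1) 0 (-1)).map (fun c => es.filter (fun p => decide (p.2 = c))) := by
    apply List.map_congr_left
    intro c hc
    have hclt : c ≤ x.2 - 1 := (PySem.List.mem_pyRange_neg_one.mp hc).2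
    simp [List.filter_append]
    omega
  have hMid : (es ++ [x]).filter (fun p => decide (p.2 = x.2))
      = es.filter (fun p => decide (p.2 = x.2)) ++ [x] := by
    simp [List.filter_append]
  rw [hHi, hLo, hMid]
  simp

-- stable descending sort by count is the bucket flattening, for counts in [1, n]
theorem pv_sorted_eq_buckets (n : Int) (es : List (String × Int))
    (hes : ∀ p ∈ es, 1 ≤ p.2 ∧ p.2 ≤ n) :
    PySem.List.sorted es (fun p => p.2) true = pvBuckets n es := by
  rw [PySem.List.sorted_rev_eq_foldl_insertBy]
  induction es using List.reverseRecOn with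
  | nil => simp [pvBuckets]
  | append_singleton es x ih =>
    rw [List.foldl_append]
    rw [ih (fun p hp => hes p (List.mem_append.mpr (Or.inl hp)))]
    simp only [List.foldl_cons, List.foldl_nil]
    exact pv_insertBy_buckets n es x (hes x (by simp)).1 (hes x (by simp)).2

-- every entry's count lies in [1, len splitedJs]
theorem pv_entries_bounds (splitedJs keywords : List String) :
    ∀ p ∈ pvEntries splitedJs keywords, 1 ≤ p.2 ∧ p.2 ≤ (splitedJs.length : Int) := by
  intro p hp
  rcases List.mem_map.mp hp with ⟨w, hw, rfl⟩
  have hmem : w ∈ splitedJs := by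
    have := (List.mem_filter.mp hw).1
    rwa [PySem.List.mem_dedup] at this
  have h1 : 1 ≤ List.count w splitedJs := List.one_le_count_iff.mpr hmem
  have h2 : List.count w splitedJs ≤ splitedJs.length := List.count_le_length
  constructor
  · simp only [PySem.List.count_eq]; exact_mod_cast h1
  · simp only [PySem.List.count_eq]; exact_mod_cast h2

-- ===== VERDICT (by name: the statement is the Claim_ definition above) =====
theorem GetRequiredKeywordsMatch_spec : Claim_equal_GetRequiredKeywordsMatch := by
  intro splitedJs keywords _
  show GetRequiredKeywordsMatch splitedJs keywords = GetRequiredKeywordsMatch_alt splitedJs keywords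
  unfold GetRequiredKeywordsMatch GetRequiredKeywordsMatch_alt
  rw [pv_itemsA splitedJs keywords, pv_entriesB splitedJs keywords]
  dsimp only
  set E := pvEntries splitedJs keywords with hE
  have hsort : PySem.List.sorted E (fun p => p.2) true = pvBuckets (splitedJs.length : Int) E :=
    pv_sorted_eq_buckets _ E (pv_entries_bounds splitedJs keywords)
  -- B's nested loop is a fold of inserts over the flattened buckets
  have hinner : ∀ (c : Int) (r : PySem.Dict String Int),
      E.foldl (fun r p => if p.2 = c then r.insert p.1 p.2 else r) r
      = (E.filter (fun p => decide (p.2 = c))).foldl (fun r p => r.insert p.1 p.2) r := by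
    intro c r
    exact PySem.List.foldl_ite_eq_foldl_filter (fun p => p.2 = c)
      (fun (r : PySem.Dict String Int) p => r.insert p.1 p.2) E r
  have hB : ((PySem.List.pyRange (splitedJs.length : Int) 0 (-1)).foldl
      (fun r c => E.foldl (fun r p => if p.2 = c then r.insert p.1 p.2 else r) r)
      PySem.Dict.empty)
      = PySem.Dict.ofList (pvBuckets (splitedJs.length : Int) E) := by
    have h1 : ((PySem.List.pyRange (splitedJs.length : Int) 0 (-1)).foldl
        (fun r c => E.foldl (fun r p => if p.2 = c then r.insert p.1 p.2 else r) r)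
        PySem.Dict.empty)
        = ((PySem.List.pyRange (splitedJs.length : Int) 0 (-1)).map
            (fun c => E.filter (fun p => decide (p.2 = c)))).foldl
          (fun r l => l.foldl (fun r p => r.insert p.1 p.2) r) PySem.Dict.empty := by
      rw [List.foldl_map]
      simp only [hinner]
    rw [h1, ← List.foldl_flatten]
    rfl
  rw [hB, hsort]
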